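-- pv_equiv track=rewrite | github.com/tobiasware/Codewars | is_interesting.py | seq_dec
-- ===== SOURCE A (Python) =====
-- def seq_dec(num):
-- 	l = list("9876543210")
-- 	index = l.index(str(num)[0])
--
-- 	for x in range(len(str(num))):
-- 		if index+x > 9:
-- 			return False
-- 		if str(num)[x] != l[index+x]:
-- 			return False
-- 	return True
-- ===== SOURCE B (Python) =====
-- def seq_dec(num):
--     s = str(num)
--     return all(ord(a) - ord(b) == 1 for a, b in zip(s, s[1:]))
-- ===== Notes on version B (the rewrite author's own statement) =====
-- stated objective: simpler
-- what changed: Drops the '9876543210' pattern table and index lookup entirely: B does a single pairwise pass checking that each adjacent pair of decimal characters differs by exactly one in code point (ord(a)-ord(b)==one), which for digit strings is equivalent to A's match against the descending-digit pattern.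
import Mathlib
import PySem

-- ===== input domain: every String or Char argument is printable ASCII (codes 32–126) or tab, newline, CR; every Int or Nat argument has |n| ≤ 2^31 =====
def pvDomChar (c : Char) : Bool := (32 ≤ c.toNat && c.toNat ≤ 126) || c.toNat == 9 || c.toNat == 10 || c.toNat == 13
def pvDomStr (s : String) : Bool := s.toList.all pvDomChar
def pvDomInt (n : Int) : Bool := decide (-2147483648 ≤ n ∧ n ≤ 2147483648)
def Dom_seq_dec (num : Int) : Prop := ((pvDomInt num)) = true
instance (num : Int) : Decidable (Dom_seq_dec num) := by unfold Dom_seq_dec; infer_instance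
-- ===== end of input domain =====

-- B drops A's '9876543210' pattern table and index lookup: one pairwise pass checking each
-- adjacent pair of characters of str(num) differs by exactly one in code point (simpler).

-- ===== PORT A =====
-- the for-loop of A with its two early returns; x runs over range(len(str(num)))
def seqDecGo (s l : List Char) (index : Nat) : List Nat → Bool
  | [] => true
  | x :: xs =>
    if index + x > 9 then false
    else
      match s[x]?, l[index + x]? with
      | some a, some b => if a ≠ b then false else seqDecGo s l index xs
      | _, _ => false

def seq_dec (num : Int) : Bool :=
  let l := "9876543210".toList
  match (PySem.Int.toStr num).toList[0]? with      -- str(num)[0]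
  | none => false                                  -- unreachable: str(num) is nonempty
  | some c =>
    match PySem.List.index? l c with               -- l.index(...): ValueError ⇒ excluded by Pre_
    | none => false
    | some index => seqDecGo (PySem.Int.toStr num).toList l index
        (List.range (PySem.Int.toStr num).toList.length)

-- ===== PORT B =====
def seq_dec_alt (num : Int) : Bool :=
  let s := (PySem.Int.toStr num).toList
  (s.zip (PySem.List.slice s (some 1) none)).all   -- zip(s, s[1:])
    (fun p => ((p.1.toNat : Int) - (p.2.toNat : Int)) == 1)   -- ord(a) - ord(b) == 1

-- ===== PRECONDITION & SPEC =====
-- Pre_ excludes negative inputs, on which A raises ValueError (the minus sign is not in the digit list).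
def Pre_seq_dec (num : Int) : Prop := 0 ≤ num
instance (num : Int) : Decidable (Pre_seq_dec num) := by unfold Pre_seq_dec; infer_instance
def pvWitness_seq_dec : Int := 543
def Spec_seq_dec (num : Int) (out : Bool) : Prop := out = seq_dec_alt num
instance (num : Int) (out : Bool) : Decidable (Spec_seq_dec num out) := by unfold Spec_seq_dec; infer_instance

-- ===== CLAIM (what is proved, stated in full; the proofs are below) =====
def Claim_equal_seq_dec : Prop := ∀ (num : Int), Dom_seq_dec num → Pre_seq_dec num → Spec_seq_dec num (seq_dec num)

-- ===== LEMMAS AND PROOFS =====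

-- A's loop from position k on decides whether the rest of s matches the pattern slice.
set_option maxRecDepth 4000 in
lemma seqDecGo_eq (s l : List Char) (hl : l.length = 10) (i : Nat) :
    ∀ m k, k ≤ s.length → m = s.length - k →
    seqDecGo s l i ((List.range s.length).drop k)
      = decide (s.drop k = (l.drop (i + k)).take (s.length - k)) := by
  intro m
  induction m with
  | zero =>
    intro k hk hm
    have hk' : k = s.length := by omega
    subst hk'
    rw [List.drop_eq_nil_of_le (by simp)]
    simp [seqDecGo]
  | succ n ih =>
    intro k hk hm
    have hklt : k < s.length := by omega
    have hdrop : (List.range s.length).drop k = k :: (List.range s.length).drop (k + 1) := by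
      rw [List.drop_eq_getElem_cons (by simpa using hklt)]
      simp
    rw [hdrop]
    by_cases hgt : i + k > 9
    · have hld : l.drop (i + k) = [] := List.drop_eq_nil_of_le (by omega)
      have hsd : s.drop k ≠ [] := by
        simp [List.drop_eq_nil_iff]; omega
      simp [seqDecGo, hgt, hld, hsd]
    · have hik : i + k < l.length := by omega
      have hsk : k < s.length := hklt
      have hsl : s.drop k = s[k] :: s.drop (k + 1) := List.drop_eq_getElem_cons hsk
      have hll : l.drop (i + k) = l[i + k] :: l.drop (i + k + 1) := List.drop_eq_getElem_cons hik
      have htake : (l.drop (i + k)).take (s.length - k)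
          = l[i + k] :: (l.drop (i + k + 1)).take (s.length - (k + 1)) := by
        rw [hll]
        have : s.length - k = (s.length - (k + 1)) + 1 := by omega
        rw [this, List.take_succ_cons]
      simp only [seqDecGo, hgt, if_false, s.getElem?_eq_getElem hsk, l.getElem?_eq_getElem hik]
      by_cases hne : s[k] = l[i + k]
      · have := ih (k + 1) (by omega) (by omega)
        rw [htake, hsl]
        simp only [hne, ne_eq, not_true_eq_false, if_false]
        rw [show i + (k + 1) = i + k + 1 by omega] at this
        simp [this]
      · rw [htake, hsl, if_pos hne]
        have hcne : s[k] :: s.drop (k + 1)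
            ≠ l[i + k] :: (l.drop (i + k + 1)).take (s.length - (k + 1)) := by
          intro hcontra
          exact hne (List.cons.injEq _ _ _ _ ▸ hcontra).1
        exact (decide_eq_false hcne).symm

-- characters are determined by their code point
lemma char_toNat_inj {a b : Char} (h : a.toNat = b.toNat) : a = b := by
  apply Char.ext
  exact UInt32.toNat_inj.mp h

-- the pattern's j-th character has code point 57 - j
lemma pat_get? (j : Nat) (hj : j < 10) :
    (("9876543210".toList)[j]?).map Char.toNat = some (57 - j) := by
  interval_cases j <;> decide

lemma pat_get (j : Nat) (hj : j < ("9876543210".toList).length) :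
    (("9876543210".toList)[j]).toNat = 57 - j := by
  have h10 : j < 10 := by simpa using hj
  have := pat_get? j h10
  rw [List.getElem?_eq_getElem hj] at this
  simpa using this

lemma pat_length : ("9876543210".toList).length = 10 := by decide

-- every character of Nat.toDigits 10 is a decimal digit, and the list is nonempty
lemma digitChar_digit (m : Nat) (hm : m < 10) :
    48 ≤ (Nat.digitChar m).toNat ∧ (Nat.digitChar m).toNat ≤ 57 := by
  interval_cases m <;> decide

lemma toDigitsCore_shape (fuel : Nat) : ∀ (n : Nat) (ds : List Char),
    ∃ t, Nat.toDigitsCore 10 fuel n ds = t ++ ds ∧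
      (∀ c ∈ t, 48 ≤ c.toNat ∧ c.toNat ≤ 57) ∧ (0 < fuel → t ≠ []) := by
  induction fuel with
  | zero => intro n ds; exact ⟨[], by simp [Nat.toDigitsCore], by simp, by omega⟩
  | succ f ih =>
    intro n ds
    by_cases h : n / 10 = 0
    · refine ⟨[(n % 10).digitChar], ?_, ?_, by simp⟩
      · simp [Nat.toDigitsCore, h]
      · intro c hc
        simp at hc
        subst hc
        exact digitChar_digit _ (Nat.mod_lt _ (by omega))
    · obtain ⟨t, ht, hdig, _⟩ := ih (n / 10) ((n % 10).digitChar :: ds)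
      refine ⟨t ++ [(n % 10).digitChar], ?_, ?_, by simp⟩
      · simp [Nat.toDigitsCore, h, ht]
      · intro c hc
        rcases List.mem_append.mp hc with h1 | h1
        · exact hdig c h1
        · simp at h1; subst h1
          exact digitChar_digit _ (Nat.mod_lt _ (by omega))

lemma toChars_digits (num : Int) (h : 0 ≤ num) :
    (PySem.Int.toChars num) ≠ [] ∧
    ∀ c ∈ PySem.Int.toChars num, 48 ≤ c.toNat ∧ c.toNat ≤ 57 := by
  obtain ⟨t, ht, hdig, hne⟩ := toDigitsCore_shape (num.toNat + 1) num.toNat []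
  have hchars : PySem.Int.toChars num = t := by
    simp [PySem.Int.toChars, not_lt.mpr h, Nat.toDigits, ht]
  rw [hchars]
  exact ⟨hne (by omega), hdig⟩

-- B's zip-all is the pairwise "code point drops by 1" property
lemma zip_all_iff (s : List Char) :
    ((s.zip s.tail).all (fun p => ((p.1.toNat : Int) - (p.2.toNat : Int)) == 1)) = true ↔
    (∀ k, (hk : k + 1 < s.length) → s[k].toNat = s[k+1].toNat + 1) := by
  rw [List.all_eq_true]
  constructor
  · intro h k hk
    have hmem : (s[k], s[k+1]) ∈ s.zip s.tail := by
      have hzl : k < (s.zip s.tail).length := by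
        simp [List.length_zip, List.length_tail]; omega
      have : (s.zip s.tail)[k] = (s[k], s[k+1]) := by
        simp [List.getElem_zip, List.getElem_tail]
      exact this ▸ List.getElem_mem hzl
    have := h _ hmem
    simp at this
    omega
  · intro h p hp
    obtain ⟨k, hk, hpk⟩ := List.mem_iff_getElem.mp hp
    have hkl : k + 1 < s.length := by
      have := hk
      simp [List.length_zip, List.length_tail] at this
      omega
    have : (s.zip s.tail)[k] = (s[k], s[k+1]) := by
      simp [List.getElem_zip, List.getElem_tail]
    rw [this] at hpk
    have := h k hkl
    subst hpk
    simp
    omega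

-- core equivalence: for a nonempty all-digit string, matching the pattern slice
-- is the pairwise decreasing-by-one property
lemma slice_eq_iff_pairwise (s : List Char) (c : Char) (i : Nat)
    (h0 : s[0]? = some c)
    (hdig : ∀ x ∈ s, 48 ≤ x.toNat ∧ x.toNat ≤ 57)
    (hi : i < 10)
    (hc : (("9876543210".toList)[i]'(by rw [pat_length]; omega)) = c) :
    (s = (("9876543210".toList).drop i).take s.length) ↔
    (∀ k, (hk : k + 1 < s.length) → s[k].toNat = s[k+1].toNat + 1) := by
  have hcnat : c.toNat = 57 - i := by rw [← hc, pat_get]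
  constructor
  · intro h k hk
    have hlen : s.length ≤ 10 - i := by
      have := congrArg List.length h
      simp at this
      omega
    have hget : ∀ j, (hj : j < s.length) → s[j].toNat = 57 - (i + j) := by
      intro j hj
      have hj2 : i + j < 10 := by omega
      have hj3 : j < ((("9876543210".toList).drop i).take s.length).length := by
        simp; omega
      have : s[j] = ("9876543210".toList)[i + j]'(by rw [pat_length]; omega) := by
        rw [List.getElem_of_eq h hj]
        rw [List.getElem_take, List.getElem_drop]
      rw [this, pat_get]
    have h1 := hget k (by omega)
    have h2 := hget (k+1) hk
    omega
  · intro hp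
    -- each position's code point: s[k].toNat + (i + k) = 57, and i + k ≤ 9
    have hstep : ∀ k, (hk : k < s.length) → s[k].toNat + (i + k) = 57 := by
      intro k
      induction k with
      | zero =>
        intro hk
        have : s[0] = c := by
          have := s.getElem?_eq_getElem hk
          rw [h0] at this
          exact (Option.some.injEq _ _ ▸ this.symm)
        rw [this]
        omega
      | succ m ih =>
        intro hk
        have hm := ih (by omega)
        have := hp m (by omega)
        have hd := hdig (s[m+1]) (List.getElem_mem (by omega))
        omega
    have hbound : s.length ≤ 10 - i := by
      rcases Nat.lt_or_ge s.length 1 with h1 | h1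
      · omega
      · have hk : s.length - 1 < s.length := by omega
        have := hstep (s.length - 1) hk
        have hd := hdig (s[s.length - 1]) (List.getElem_mem hk)
        omega
    apply List.ext_getElem
    · simp; omega
    · intro j hj1 hj2
      rw [List.getElem_take, List.getElem_drop]
      apply char_toNat_inj
      rw [pat_get _ (by rw [pat_length]; omega)]
      have := hstep j hj1
      omega

-- ===== VERDICT (by name: the statement is the Claim_ definition above) =====
set_option maxRecDepth 8000 in
theorem seq_dec_spec : Claim_equal_seq_dec := by
  intro num _ hpre
  unfold Spec_seq_dec seq_dec seq_dec_alt
  dsimp only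
  obtain ⟨hne, hdig⟩ := toChars_digits num hpre
  have hlist : (PySem.Int.toStr num).toList = PySem.Int.toChars num := PySem.Int.toList_toStr num
  rw [hlist]
  set s := PySem.Int.toChars num with hs
  have hslen : 0 < s.length := List.length_pos_iff.mpr hne
  have h0 : s[0]? = some (s[0]'hslen) := s.getElem?_eq_getElem hslen
  rw [h0]
  dsimp only
  set c := s[0]'hslen with hcdef
  have hcd : 48 ≤ c.toNat ∧ c.toNat ≤ 57 := hdig c (List.getElem_mem hslen)
  -- c is in the pattern, at position 57 - c.toNat
  have hj : 57 - c.toNat < 10 := by omega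
  have hpatc : (("9876543210".toList)[57 - c.toNat]'(by rw [pat_length]; omega)) = c := by
    apply char_toNat_inj
    rw [pat_get _ (by rw [pat_length]; omega)]
    omega
  have hmem : c ∈ "9876543210".toList := hpatc ▸ List.getElem_mem (by rw [pat_length]; omega)
  cases hidx : PySem.List.index? ("9876543210".toList) c with
  | none =>
    have hsome := (PySem.List.index?_isSome_iff ("9876543210".toList) c).mpr hmem
    rw [hidx] at hsome
    simp at hsome
  | some i =>
    dsimp only
    obtain ⟨hilt, hieq, _⟩ := PySem.List.getElem_of_index?_eq_some hidx
    have hi10 : i < 10 := by rwa [pat_length] at hilt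
    have := seqDecGo_eq s ("9876543210".toList) pat_length i (s.length) 0 (by omega) (by omega)
    rw [List.drop_zero] at this
    rw [this]
    rw [PySem.List.slice_from_one]
    simp only [List.drop_zero, Nat.sub_zero, Nat.add_zero]
    cases hb : (s.zip s.tail).all (fun p => ((p.1.toNat : Int) - (p.2.toNat : Int)) == 1) with
    | false =>
      apply decide_eq_false
      intro hcontra
      have hp := (slice_eq_iff_pairwise s c i h0 hdig hi10 hieq).mp hcontra
      have := (zip_all_iff s).mpr hp
      rw [hb] at this
      exact Bool.false_ne_true this
    | true =>
      exact decide_eq_true ((slice_eq_iff_pairwise s c i h0 hdig hi10 hieq).mpr ((zip_all_iff s).mp hb))
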